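-- pv_equiv track=rewrite | github.com/turnstonelabs/turnstone | turnstone/core/edit.py | pick_nearest
-- ===== SOURCE A (Python) =====
-- def pick_nearest(content: str, old_string: str, near_line: int) -> int:
--     """Return the char index of the occurrence of old_string nearest to near_line."""
--     line_starts = [0]
--     for i, ch in enumerate(content):
--         if ch == "\n":
--             line_starts.append(i + 1)
--
--     best_idx = -1
--     best_dist = float("inf")
--     start = 0
--     while True:
--         idx = content.find(old_string, start)
--         if idx == -1:
--             break
--         # Find line number for this occurrence
--         lo, hi = 0, len(line_starts) - 1
--         while lo < hi:
--             mid = (lo + hi + 1) // 2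
--             if line_starts[mid] <= idx:
--                 lo = mid
--             else:
--                 hi = mid - 1
--         line_num = lo + 1
--         dist = abs(line_num - near_line)
--         if dist < best_dist:
--             best_dist = dist
--             best_idx = idx
--         start = idx + 1
--     return best_idx
-- ===== SOURCE B (Python) =====
-- def pick_nearest(content: str, old_string: str, near_line: int) -> int:
--     """Return the char index of the occurrence of old_string nearest to near_line.
--
--     Single left-to-right pass: no line-start table and no binary search; the
--     current line number is carried along while scanning every position once.
--     """
--     best_idx = -1
--     best_dist = None
--     line = 1
--     for i in range(len(content) + 1):
--         if content.startswith(old_string, i):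
--             dist = abs(line - near_line)
--             if best_dist is None or dist < best_dist:
--                 best_dist = dist
--                 best_idx = i
--         if i < len(content) and content[i] == "\n":
--             line += 1
--     return best_idx
-- ===== Notes on version B (the rewrite author's own statement) =====
-- stated objective: simpler
-- what changed: Replaced the line-starts table plus per-occurrence binary search and repeated find() calls by one single left-to-right pass that checks every position with startswith while carrying the current line number in a counter.
import Mathlib
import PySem

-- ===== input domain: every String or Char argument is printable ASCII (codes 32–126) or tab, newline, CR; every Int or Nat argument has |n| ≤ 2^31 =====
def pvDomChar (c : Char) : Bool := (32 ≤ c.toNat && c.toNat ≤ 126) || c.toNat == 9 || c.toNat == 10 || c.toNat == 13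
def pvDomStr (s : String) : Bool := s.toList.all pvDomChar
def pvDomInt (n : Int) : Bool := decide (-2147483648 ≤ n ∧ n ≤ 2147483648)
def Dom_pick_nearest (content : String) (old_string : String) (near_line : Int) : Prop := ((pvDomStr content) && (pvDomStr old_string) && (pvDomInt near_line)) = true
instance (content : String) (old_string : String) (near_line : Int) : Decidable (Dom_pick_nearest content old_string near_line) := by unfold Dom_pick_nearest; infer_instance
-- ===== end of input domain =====

-- B replaces A's line-starts table, binary search and repeated find() calls by one
-- left-to-right pass carrying the current line number (objective: simpler).

-- ===== PORT A =====
-- A's inner binary search over line_starts; lo/hi are list indices that stay in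
-- range throughout, so line_starts[mid] is ported as pyGetD (exact here); lo, hi ≥ 0
-- so Nat (lo+hi+1)/2 equals Python's floor division.
def pvBSearch (L : List Int) (idx : Int) (lo hi : Nat) : Nat :=
  if lo < hi then
    if PySem.List.pyGetD L (((lo + hi + 1) / 2 : Nat) : Int) 0 ≤ idx then
      pvBSearch L idx ((lo + hi + 1) / 2) hi
    else
      pvBSearch L idx lo ((lo + hi + 1) / 2 - 1)
  else lo
termination_by hi - lo
decreasing_by
  · omega
  · omega

-- A's 'while True' loop over occurrences; fuel only makes it total (each step has
-- start = idx + 1 > start and find returns -1 once start > len, so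
-- cs.length + 2 steps always suffice); best_dist = none plays float("inf").
def pvLoopA (cs pat : List Char) (ls : List Int) (near : Int)
    (best_idx : Int) (best_dist : Option Int) (start : Int) : Nat → Int
  | 0 => best_idx
  | fuel + 1 =>
    let idx := PySem.Chars.findFrom cs pat start none
    if idx = -1 then best_idx
    else
      let line_num : Int := (pvBSearch ls idx 0 (ls.length - 1) : Int) + 1
      let dist := |line_num - near|
      if (match best_dist with | none => true | some d => dist < d) then
        pvLoopA cs pat ls near idx (some dist) (idx + 1) fuel
      else
        pvLoopA cs pat ls near best_idx best_dist (idx + 1) fuel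

def pick_nearest (content : String) (old_string : String) (near_line : Int) : Int :=
  let cs := content.toList
  let line_starts : List Int :=
    (PySem.List.enumerate cs).foldl
      (fun ls p => if p.2 == '\n' then ls ++ [p.1 + 1] else ls) [0]
  pvLoopA cs old_string.toList line_starts near_line (-1) none 0 (cs.length + 2)

-- ===== PORT B =====
-- content.startswith(old_string, i) for 0 ≤ i is exactly startswith on content[i:];
-- content[i] under the guard i < len(content) is in range, ported as pyGetD.
def pick_nearest_alt (content : String) (old_string : String) (near_line : Int) : Int :=
  let cs := content.toList
  let pat := old_string.toList
  let res := (PySem.List.pyRange 0 ((cs.length : Int) + 1) 1).foldl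
    (fun (st : Int × Option Int × Int) i =>
      let st' :=
        if PySem.Chars.startswith (cs.drop i.toNat) pat then
          let dist := |st.2.2 - near_line|
          if (match st.2.1 with | none => true | some d => dist < d) then
            (i, some dist, st.2.2)
          else st
        else st
      if i < (cs.length : Int) ∧ PySem.List.pyGetD cs i ' ' = '\n' then
        (st'.1, st'.2.1, st'.2.2 + 1)
      else st')
    (-1, none, 1)
  res.1

-- ===== PRECONDITION & SPEC =====
def Spec_pick_nearest (content : String) (old_string : String) (near_line : Int) (out : Int) : Prop := out = pick_nearest_alt content old_string near_line
instance (content : String) (old_string : String) (near_line : Int) (out : Int) : Decidable (Spec_pick_nearest content old_string near_line out) := by unfold Spec_pick_nearest; infer_instance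

-- ===== CLAIM (what is proved, stated in full; the proofs are below) =====
def Claim_equal_pick_nearest : Prop := ∀ (content : String) (old_string : String) (near_line : Int), Dom_pick_nearest content old_string near_line → Spec_pick_nearest content old_string near_line (pick_nearest content old_string near_line)

-- ===== LEMMAS AND PROOFS =====

-- the common denominator: the increasing list of occurrence positions from s
def pvOcc (cs pat : List Char) (s : Nat) : List Nat :=
  if s < cs.length + 1 then
    (if PySem.Chars.startswith (cs.drop s) pat then [s] else []) ++ pvOcc cs pat (s + 1)
  else []
termination_by cs.length + 1 - s

-- the line number of position i
def pvLine (cs : List Char) (i : Nat) : Int := (((cs.take i).count '\n' : Nat) : Int) + 1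

-- the common best-occurrence update
def pvUpd (cs : List Char) (near : Int) (st : Int × Option Int) (i : Nat) : Int × Option Int :=
  let dist := |pvLine cs i - near|
  match st.2 with
  | none => ((i : Int), some dist)
  | some d => if dist < d then ((i : Int), some dist) else st

-- line-starts characterization: pvE cs s = successors of newline positions, offset s
def pvE : List Char → Int → List Int
  | [], _ => []
  | c :: t, s => if c == '\n' then (s + 1) :: pvE t (s + 1) else pvE t (s + 1)

lemma pvE_eq_enum (cs : List Char) : ∀ s : Int,
    ((PySem.List.enumerate cs s).filter (fun p => p.2 == '\n')).map (fun p => p.1 + 1) = pvE cs s := by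
  induction cs with
  | nil => intro s; simp [PySem.List.enumerate_nil, pvE]
  | cons c t ih =>
    intro s
    rw [PySem.List.enumerate_cons]
    by_cases h : c = '\n' <;> simp [h, pvE, ih]

lemma pvLineStarts_eq (cs : List Char) :
    (PySem.List.enumerate cs).foldl (fun ls p => if p.2 == '\n' then ls ++ [p.1 + 1] else ls) [0]
      = 0 :: pvE cs 0 := by
  have h := PySem.List.foldl_append_if (fun q : Int × Char => q.2 == '\n') (fun q => q.1 + 1)
    (PySem.List.enumerate cs) ([0] : List Int)
  rw [h, pvE_eq_enum]
  rfl

lemma pvE_length (cs : List Char) : ∀ s, (pvE cs s).length = cs.count '\n' := by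
  induction cs with
  | nil => intro s; simp [pvE]
  | cons c t ih =>
    intro s
    by_cases h : c = '\n' <;> simp [pvE, h, ih]

lemma pvE_ge (cs : List Char) : ∀ s v, v ∈ pvE cs s → s + 1 ≤ v := by
  induction cs with
  | nil => intro s v h; simp [pvE] at h
  | cons c t ih =>
    intro s v h
    by_cases hc : c = '\n' <;> simp [pvE, hc] at h
    · rcases h with h | h
      · omega
      · have := ih (s + 1) v h; omega
    · have := ih (s + 1) v h; omega

lemma pvE_getD_mem (t : List Char) (s : Int) (j : Nat) (hj : j < t.count '\n') :
    s + 2 ≤ (pvE t (s + 1)).getD j 0 := by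
  have hl : j < (pvE t (s + 1)).length := by rw [pvE_length]; exact hj
  have hm : (pvE t (s + 1)).getD j 0 ∈ pvE t (s + 1) := by
    rw [List.getD_eq_getElem _ _ hl]; exact List.getElem_mem _
  have := pvE_ge t (s + 1) _ hm
  omega

lemma pvE_getD_le (cs : List Char) : ∀ (j x : Nat) (s : Int), j < cs.count '\n' →
    ((pvE cs s).getD j 0 ≤ s + x ↔ (j + 1 : Nat) ≤ (cs.take x).count '\n') := by
  induction cs with
  | nil => intro j x s hj; simp at hj
  | cons c t ih =>
    intro j x s hj
    by_cases hc : c = '\n'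
    · subst hc
      cases j with
      | zero =>
        cases x with
        | zero =>
          simp [pvE]
        | succ x' =>
          simp [pvE]
      | succ j' =>
        have hj' : j' < t.count '\n' := by simp at hj; omega
        have hgd : (pvE ('\n' :: t) s).getD (j' + 1) 0 = (pvE t (s + 1)).getD j' 0 := by
          simp [pvE]
        rw [hgd]
        cases x with
        | zero =>
          have hge := pvE_getD_mem t s j' hj'
          constructor
          · intro h; push_cast at h; omega
          · intro h; simp at h
        | succ x' =>
          have hih := ih j' x' (s + 1) hj'
          have hcnt : (('\n' :: t).take (x' + 1)).count '\n' = (t.take x').count '\n' + 1 := by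
            simp [List.count_cons]
          rw [hcnt]
          constructor
          · intro h
            have : j' + 1 ≤ (t.take x').count '\n' := hih.1 (by push_cast at h ⊢; omega)
            omega
          · intro h
            have h2 : (pvE t (s + 1)).getD j' 0 ≤ s + 1 + x' := hih.2 (by omega)
            push_cast at h2 ⊢; omega
    · have hcnt : (c :: t).count '\n' = t.count '\n' := by simp [hc]
      rw [hcnt] at hj
      have hgd : (pvE (c :: t) s).getD j 0 = (pvE t (s + 1)).getD j 0 := by
        simp [pvE, hc]
      rw [hgd]
      cases x with
      | zero =>
        have hge := pvE_getD_mem t s j hj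
        constructor
        · intro h; push_cast at h; omega
        · intro h; simp at h
      | succ x' =>
        have hih := ih j x' (s + 1) hj
        have hcnt2 : ((c :: t).take (x' + 1)).count '\n' = (t.take x').count '\n' := by
          simp [hc]
        rw [hcnt2]
        constructor
        · intro h
          exact hih.1 (by push_cast at h ⊢; omega)
        · intro h
          have h2 := hih.2 h
          push_cast at h2 ⊢; omega

lemma pvLS_getD_iff (cs : List Char) (j x : Nat) (hj : j ≤ cs.count '\n') :
    ((0 :: pvE cs 0).getD j 0 ≤ (x : Int)) ↔ j ≤ (cs.take x).count '\n' := by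
  cases j with
  | zero => simp
  | succ j' =>
    have h := pvE_getD_le cs j' x 0 (by omega)
    simpa using h

lemma pvBSearch_eq_aux (L : List Int) (x : Int) (t : Nat)
    (hlow : ∀ j, j ≤ t → L.getD j 0 ≤ x) :
    ∀ fuel lo hi, hi - lo ≤ fuel → lo ≤ t → t ≤ hi →
      (∀ j, t < j → j ≤ hi → ¬ L.getD j 0 ≤ x) → pvBSearch L x lo hi = t := by
  intro fuel
  induction fuel with
  | zero =>
    intro lo hi hf h1 h2 h3
    rw [pvBSearch]
    simp only [show ¬ lo < hi by omega, if_false]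
    omega
  | succ m ih =>
    intro lo hi hf h1 h2 h3
    rw [pvBSearch]
    by_cases hlh : lo < hi
    · simp only [hlh, if_true]
      rw [PySem.List.pyGetD_natCast]
      by_cases hmid : L.getD ((lo + hi + 1) / 2) 0 ≤ x
      · simp only [hmid, if_true]
        have hle : (lo + hi + 1) / 2 ≤ t := by
          by_contra hc
          exact h3 _ (by omega) (by omega) hmid
        exact ih _ hi (by omega) hle h2 h3
      · simp only [hmid, if_false]
        have hgt : t < (lo + hi + 1) / 2 := by
          by_contra hc
          exact hmid (hlow _ (by omega))
        exact ih lo _ (by omega) h1 (by omega) (fun j hj1 hj2 => h3 j hj1 (by omega))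
    · simp only [hlh, if_false]
      omega

-- the binary search of A returns the newline count of the prefix
lemma pvBSearch_line (cs : List Char) (r : Nat) (_hr : r ≤ cs.length) :
    pvBSearch (0 :: pvE cs 0) (r : Int) 0 ((0 :: pvE cs 0).length - 1) = (cs.take r).count '\n' := by
  have hlen : (0 :: pvE cs 0).length - 1 = cs.count '\n' := by simp [pvE_length]
  have htle : (cs.take r).count '\n' ≤ cs.count '\n' :=
    (List.take_sublist r cs).count_le '\n'
  rw [hlen]
  have hlow : ∀ j, j ≤ (cs.take r).count '\n' → (0 :: pvE cs 0).getD j 0 ≤ (r : Int) := by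
    intro j hj
    exact (pvLS_getD_iff cs j r (by omega)).2 (by omega)
  have hhigh : ∀ j, (cs.take r).count '\n' < j → j ≤ cs.count '\n' →
      ¬ (0 :: pvE cs 0).getD j 0 ≤ (r : Int) := by
    intro j hj1 hj2 hle
    have := (pvLS_getD_iff cs j r hj2).1 hle
    omega
  exact pvBSearch_eq_aux _ _ _ hlow (cs.count '\n') 0 (cs.count '\n') (by omega) (by omega) htle hhigh

lemma pvFindFrom_past (cs pat : List Char) (si : Int) (h : (cs.length : Int) < si) :
    PySem.Chars.findFrom cs pat si none = -1 := by
  simp only [PySem.Chars.findFrom]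
  rw [if_neg (show ¬ si < 0 by omega)]
  rw [if_pos h]

lemma pvOcc_nil (cs pat : List Char) :
    ∀ fuel s, cs.length + 1 - s ≤ fuel → ¬ pat <:+: cs.drop s → pvOcc cs pat s = [] := by
  intro fuel
  induction fuel with
  | zero =>
    intro s hf _
    rw [pvOcc]
    simp only [show ¬ s < cs.length + 1 by omega, if_false]
  | succ m ih =>
    intro s hf hinf
    rw [pvOcc]
    by_cases hs : s < cs.length + 1
    · simp only [hs, if_true]
      have hpre : ¬ pat <+: cs.drop s := fun hp => hinf hp.isInfix
      have hsw : PySem.Chars.startswith (cs.drop s) pat = false := by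
        rw [Bool.eq_false_iff]
        intro hc
        exact hpre ((PySem.Chars.startswith_iff _ _).1 hc)
      rw [hsw]
      simp only [Bool.false_eq_true, if_false, List.nil_append]
      apply ih (s + 1) (by omega)
      intro hc
      apply hinf
      have h15 : (cs.drop s).drop 1 = cs.drop (s + 1) := by
        rw [List.drop_drop, Nat.add_comm]
      exact hc.trans (h15 ▸ (List.drop_suffix 1 (cs.drop s)).isInfix)
    · simp only [hs, if_false]

lemma pvOcc_cons (cs pat : List Char) :
    ∀ fuel s r, r - s ≤ fuel → s ≤ r → r ≤ cs.length → pat <+: cs.drop r →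
      (∀ i, s ≤ i → i < r → ¬ pat <+: cs.drop i) →
      pvOcc cs pat s = r :: pvOcc cs pat (r + 1) := by
  intro fuel
  induction fuel with
  | zero =>
    intro s r hf h1 h2 h3 _
    have hsr : s = r := by omega
    subst hsr
    rw [pvOcc]
    simp only [show s < cs.length + 1 by omega, if_true]
    rw [(PySem.Chars.startswith_iff _ _).2 h3]
    simp
  | succ m ih =>
    intro s r hf h1 h2 h3 h4
    by_cases hsr : s = r
    · subst hsr
      rw [pvOcc]
      simp only [show s < cs.length + 1 by omega, if_true]
      rw [(PySem.Chars.startswith_iff _ _).2 h3]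
      simp
    · rw [pvOcc]
      simp only [show s < cs.length + 1 by omega, if_true]
      have hsw : PySem.Chars.startswith (cs.drop s) pat = false := by
        rw [Bool.eq_false_iff]
        intro hc
        exact h4 s (le_refl s) (by omega) ((PySem.Chars.startswith_iff _ _).1 hc)
      rw [hsw]
      simp only [Bool.false_eq_true, if_false, List.nil_append]
      exact ih (s + 1) r (by omega) (by omega) h2 h3 (fun i hi1 hi2 => h4 i (by omega) hi2)

-- A's occurrence loop folds pvUpd over the occurrence list
lemma pvLoopA_eq (cs pat : List Char) (near : Int) :
    ∀ fuel (s : Nat) b bd, s ≤ cs.length + 1 → cs.length + 2 - s ≤ fuel →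
      pvLoopA cs pat (0 :: pvE cs 0) near b bd (s : Int) fuel
        = (List.foldl (pvUpd cs near) (b, bd) (pvOcc cs pat s)).1 := by
  intro fuel
  induction fuel with
  | zero => intro s b bd h1 h2; omega
  | succ m ih =>
    intro s b bd h1 h2
    show (let idx := PySem.Chars.findFrom cs pat (s : Int) none
      if idx = -1 then b
      else
        let line_num : Int := (pvBSearch (0 :: pvE cs 0) idx 0 ((0 :: pvE cs 0).length - 1) : Int) + 1
        let dist := |line_num - near|
        if (match bd with | none => true | some d => dist < d) then
          pvLoopA cs pat (0 :: pvE cs 0) near idx (some dist) (idx + 1) m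
        else
          pvLoopA cs pat (0 :: pvE cs 0) near b bd (idx + 1) m)
      = (List.foldl (pvUpd cs near) (b, bd) (pvOcc cs pat s)).1
    by_cases hs : s ≤ cs.length
    · by_cases hinf : pat <:+: cs.drop s
      · -- an occurrence exists: findFrom returns its position r
        have hne : PySem.Chars.findFrom cs pat (s : Int) none ≠ -1 := by
          rw [Ne, PySem.Chars.findFrom_natCast_eq_neg_one_iff cs pat s hs]
          exact fun h => h hinf
        obtain ⟨hge, hpre, hmin⟩ := PySem.Chars.findFrom_natCast_spec cs pat s hs hne
        set idx := PySem.Chars.findFrom cs pat (s : Int) none with hidx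
        have hidx0 : 0 ≤ idx := le_trans (by exact_mod_cast Nat.zero_le s) hge
        set r := idx.toNat with hrdef
        have hcast : idx = (r : Int) := by omega
        have hrle : r ≤ cs.length := by
          by_contra hc
          have : cs.drop r = [] := List.drop_eq_nil_of_le (by omega)
          rw [this] at hpre
          have hpn : pat = [] := List.prefix_nil.1 hpre
          have : pat <+: cs.drop s := by rw [hpn]; exact List.nil_prefix
          exact hmin s (le_refl s) (by omega) this
        have hsr : s ≤ r := by omega
        have hocc : pvOcc cs pat s = r :: pvOcc cs pat (r + 1) :=
          pvOcc_cons cs pat (r - s) s r (le_refl _) hsr hrle hpre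
            (fun i hi1 hi2 => hmin i hi1 hi2)
        have hbs : pvBSearch (0 :: pvE cs 0) idx 0 ((0 :: pvE cs 0).length - 1)
            = (cs.take r).count '\n' := by
          rw [hcast]
          exact pvBSearch_line cs r hrle
        simp only [if_neg hne, hbs]
        rw [hocc]
        simp only [List.foldl_cons]
        have hdist : |((List.count '\n' (List.take r cs) : Nat) : Int) + 1 - near| = |pvLine cs r - near| := by
          simp [pvLine]
        cases bd with
        | none =>
          simp only []
          rw [if_pos trivial]
          rw [hcast, show ((r : Int) + 1) = ((r + 1 : Nat) : Int) by push_cast; ring]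
          rw [ih (r + 1) ((r : Int)) (some |((List.count '\n' (List.take r cs) : Nat) : Int) + 1 - near|) (by omega) (by omega)]
          simp [pvUpd, pvLine]
        | some d =>
          by_cases hlt : |((List.count '\n' (List.take r cs) : Nat) : Int) + 1 - near| < d
          · rw [if_pos (by simpa using hlt)]
            rw [hcast, show ((r : Int) + 1) = ((r + 1 : Nat) : Int) by push_cast; ring]
            rw [ih (r + 1) ((r : Int)) _ (by omega) (by omega)]
            simp only [pvUpd, pvLine]
            rw [if_pos hlt]
          · rw [if_neg (by simpa using hlt)]
            rw [hcast, show ((r : Int) + 1) = ((r + 1 : Nat) : Int) by push_cast; ring]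
            rw [ih (r + 1) b (some d) (by omega) (by omega)]
            have : pvUpd cs near (b, some d) r = (b, some d) := by
              simp only [pvUpd, pvLine]
              rw [if_neg (by omega)]
            rw [this]
      · -- no occurrence from s on
        have heq : PySem.Chars.findFrom cs pat (s : Int) none = -1 :=
          (PySem.Chars.findFrom_natCast_eq_neg_one_iff cs pat s hs).2 hinf
        rw [pvOcc_nil cs pat (cs.length + 1 - s) s (le_refl _) hinf]
        simp [heq]
    · -- s = cs.length + 1: find past the end returns -1
      have hseq : s = cs.length + 1 := by omega
      have heq : PySem.Chars.findFrom cs pat (s : Int) none = -1 :=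
        pvFindFrom_past cs pat _ (by exact_mod_cast (by omega : (cs.length : Int) < (s : Int)))
      have hocc : pvOcc cs pat s = [] := by
        rw [pvOcc]
        simp only [show ¬ s < cs.length + 1 by omega, if_false]
      rw [hocc]
      simp [heq]

lemma pvLine_succ_nl (cs : List Char) (s : Nat) (h : s < cs.length) (hc : cs.getD s ' ' = '\n') :
    pvLine cs (s + 1) = pvLine cs s + 1 := by
  have ht : cs.take (s + 1) = cs.take s ++ [cs[s]] := by
    rw [List.take_add_one, List.getElem?_eq_getElem h]
    rfl
  have hg : cs[s] = '\n' := by rwa [List.getD_eq_getElem _ _ h] at hc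
  simp [pvLine, ht, hg, List.count_append]

lemma pvLine_succ_other (cs : List Char) (s : Nat) (h : ¬ (s < cs.length ∧ cs.getD s ' ' = '\n')) :
    pvLine cs (s + 1) = pvLine cs s := by
  by_cases hl : s < cs.length
  · have hc : cs.getD s ' ' ≠ '\n' := fun hc => h ⟨hl, hc⟩
    have ht : cs.take (s + 1) = cs.take s ++ [cs[s]] := by
      rw [List.take_add_one, List.getElem?_eq_getElem hl]
      rfl
    have hg : cs[s] ≠ '\n' := by rwa [List.getD_eq_getElem _ _ hl] at hc
    simp only [pvLine]
    rw [ht, List.count_append]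
    simp [hg]
  · have h1 : cs.take (s + 1) = cs := List.take_of_length_le (by omega)
    have h2 : cs.take s = cs := List.take_of_length_le (by omega)
    simp [pvLine, h1, h2]

-- B's single pass folds pvUpd over the occurrence list while tracking the line counter
lemma pvLoopB_eq (cs pat : List Char) (near : Int) :
    ∀ fuel (s : Nat) b bd, cs.length + 1 - s ≤ fuel → s ≤ cs.length + 1 →
      ∃ ln, (PySem.List.pyRange (s : Int) ((cs.length : Int) + 1) 1).foldl
        (fun (st : Int × Option Int × Int) i =>
          let st' :=
            if PySem.Chars.startswith (cs.drop i.toNat) pat then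
              let dist := |st.2.2 - near|
              if (match st.2.1 with | none => true | some d => dist < d) then
                (i, some dist, st.2.2)
              else st
            else st
          if i < (cs.length : Int) ∧ PySem.List.pyGetD cs i ' ' = '\n' then
            (st'.1, st'.2.1, st'.2.2 + 1)
          else st')
        (b, bd, pvLine cs s)
      = ((List.foldl (pvUpd cs near) (b, bd) (pvOcc cs pat s)).1,
         (List.foldl (pvUpd cs near) (b, bd) (pvOcc cs pat s)).2, ln) := by
  intro fuel
  induction fuel with
  | zero =>
    intro s b bd hf hs
    have hseq : s = cs.length + 1 := by omega
    refine ⟨pvLine cs s, ?_⟩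
    rw [PySem.List.pyRange_one_eq_nil (by omega)]
    have hocc : pvOcc cs pat s = [] := by
      rw [pvOcc]; simp only [show ¬ s < cs.length + 1 by omega, if_false]
    rw [hocc]
    rfl
  | succ m ih =>
    intro s b bd hf hs
    by_cases hslt : s ≤ cs.length
    · have hocc : pvOcc cs pat s =
          (if PySem.Chars.startswith (cs.drop s) pat then [s] else []) ++ pvOcc cs pat (s + 1) := by
        rw [pvOcc]; simp only [show s < cs.length + 1 by omega, if_true]
      -- compute the step: the pair (b', bd') after position s, and the line update
      have hstep : ∀ (L : List Int),
          List.foldl (fun (st : Int × Option Int × Int) i =>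
            let st' :=
              if PySem.Chars.startswith (cs.drop i.toNat) pat then
                let dist := |st.2.2 - near|
                if (match st.2.1 with | none => true | some d => dist < d) then
                  (i, some dist, st.2.2)
                else st
              else st
            if i < (cs.length : Int) ∧ PySem.List.pyGetD cs i ' ' = '\n' then
              (st'.1, st'.2.1, st'.2.2 + 1)
            else st') (b, bd, pvLine cs s) (((s : Nat) : Int) :: L)
          = List.foldl (fun (st : Int × Option Int × Int) i =>
            let st' :=
              if PySem.Chars.startswith (cs.drop i.toNat) pat then
                let dist := |st.2.2 - near|
                if (match st.2.1 with | none => true | some d => dist < d) then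
                  (i, some dist, st.2.2)
                else st
              else st
            if i < (cs.length : Int) ∧ PySem.List.pyGetD cs i ' ' = '\n' then
              (st'.1, st'.2.1, st'.2.2 + 1)
            else st')
            ((List.foldl (pvUpd cs near) (b, bd)
                (if PySem.Chars.startswith (cs.drop s) pat then [s] else [])).1,
             (List.foldl (pvUpd cs near) (b, bd)
                (if PySem.Chars.startswith (cs.drop s) pat then [s] else [])).2,
             pvLine cs (s + 1)) L := by
        intro L
        rw [List.foldl_cons]
        refine congrArg (fun st => List.foldl _ st L) ?_
        simp only [Int.toNat_natCast, PySem.List.pyGetD_natCast]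
        by_cases hP : PySem.Chars.startswith (cs.drop s) pat
        · simp only [hP, if_true, List.foldl_cons, List.foldl_nil]
          cases bd with
          | none =>
            simp only [pvUpd, if_pos trivial]
            by_cases hnl : (s : Int) < (cs.length : Int) ∧ cs.getD s ' ' = '\n'
            · rw [if_pos hnl, pvLine_succ_nl cs s (by exact_mod_cast hnl.1) hnl.2]
            · rw [if_neg hnl, pvLine_succ_other cs s (by
                intro ⟨a1, a2⟩; exact hnl ⟨by exact_mod_cast a1, a2⟩)]
          | some d =>
            by_cases hlt : |pvLine cs s - near| < d
            · simp only [pvUpd, hlt, decide_true, if_true]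
              by_cases hnl : (s : Int) < (cs.length : Int) ∧ cs.getD s ' ' = '\n'
              · rw [if_pos hnl, pvLine_succ_nl cs s (by exact_mod_cast hnl.1) hnl.2]
              · rw [if_neg hnl, pvLine_succ_other cs s (by
                  intro ⟨a1, a2⟩; exact hnl ⟨by exact_mod_cast a1, a2⟩)]
            · simp only [pvUpd, hlt, decide_false, Bool.false_eq_true, if_false]
              by_cases hnl : (s : Int) < (cs.length : Int) ∧ cs.getD s ' ' = '\n'
              · rw [if_pos hnl, pvLine_succ_nl cs s (by exact_mod_cast hnl.1) hnl.2]
              · rw [if_neg hnl, pvLine_succ_other cs s (by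
                  intro ⟨a1, a2⟩; exact hnl ⟨by exact_mod_cast a1, a2⟩)]
        · simp only [hP, Bool.false_eq_true, if_false, List.foldl_nil]
          by_cases hnl : (s : Int) < (cs.length : Int) ∧ cs.getD s ' ' = '\n'
          · rw [if_pos hnl, pvLine_succ_nl cs s (by exact_mod_cast hnl.1) hnl.2]
          · rw [if_neg hnl, pvLine_succ_other cs s (by
              intro ⟨a1, a2⟩; exact hnl ⟨by exact_mod_cast a1, a2⟩)]
      obtain ⟨ln, hih⟩ := ih (s + 1)
        (List.foldl (pvUpd cs near) (b, bd)
          (if PySem.Chars.startswith (cs.drop s) pat then [s] else [])).1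
        (List.foldl (pvUpd cs near) (b, bd)
          (if PySem.Chars.startswith (cs.drop s) pat then [s] else [])).2
        (by omega) (by omega)
      refine ⟨ln, ?_⟩
      rw [PySem.List.pyRange_one_cons (by exact_mod_cast (by omega : (s : Int) < (cs.length : Int) + 1))]
      rw [show (s : Int) + 1 = ((s + 1 : Nat) : Int) by push_cast; ring]
      rw [hstep _, hocc, List.foldl_append]
      simpa only [Prod.mk.eta] using hih
    · have hseq : s = cs.length + 1 := by omega
      refine ⟨pvLine cs s, ?_⟩
      rw [PySem.List.pyRange_one_eq_nil (by exact_mod_cast (by omega : (cs.length : Int) + 1 ≤ (s : Int)))]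
      have hocc : pvOcc cs pat s = [] := by
        rw [pvOcc]; simp only [show ¬ s < cs.length + 1 by omega, if_false]
      rw [hocc]
      rfl

-- ===== VERDICT =====
theorem pick_nearest_spec : Claim_equal_pick_nearest := by
  intro content old_string near_line _hdom
  show pick_nearest content old_string near_line = pick_nearest_alt content old_string near_line
  have hA := pvLoopA_eq content.toList old_string.toList near_line
    (content.toList.length + 2) 0 (-1) none (by omega) (by omega)
  obtain ⟨ln, hB⟩ := pvLoopB_eq content.toList old_string.toList near_line
    (content.toList.length + 1) 0 (-1) none (by omega) (by omega)
  simp only [Nat.cast_zero] at hA hB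
  have h0 : pvLine content.toList 0 = 1 := by simp [pvLine]
  rw [h0] at hB
  simp only [pick_nearest, pick_nearest_alt]
  rw [pvLineStarts_eq, hA, hB]
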